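-- pv_equiv track=rewrite | github.com/crmarsh/advent_of_code | 2015/day13/code.py | score_path
-- ===== SOURCE A (Python) =====
-- def score_path(path, pair_points):
--     n = len(path)
--     total = 0
--     for i in range(n):
--         j = (i + 1) % n
--         k = (i + n - 1) % n
--         p0 = path[i]
--         p1 = path[j]
--         p2 = path[k]
--         total += pair_points.get((p0, p1), 0)
--         total += pair_points.get((p0, p2), 0)
--     return total
-- ===== SOURCE B (Python) =====
-- def score_path(path, pair_points):
--     # Stage 1: count every directed adjacent edge around the circle once.
--     edge_count = {}
--     for e in zip(path, path[1:] + path[:1]):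
--         edge_count[e] = edge_count.get(e, 0) + 1
--     # Stage 2: iterate over the score table, weighting each entry by how
--     # often its pair sits together (in either direction).
--     total = 0
--     for (a, b), v in pair_points.items():
--         total += v * (edge_count.get((a, b), 0) + edge_count.get((b, a), 0))
--     return total
-- ===== Notes on version B (the rewrite author's own statement) =====
-- stated objective: alternative
-- what changed: B builds a counter of directed adjacent edges in one pass and then iterates over the pair_points table, adding v * (edge occurrences in either direction) per entry, instead of A's per-node loop doing modular prev/next lookups into pair_points; B does O(m) table iterations plus O(n) counter updates rather than 2n dict lookups.
import Mathlib
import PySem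

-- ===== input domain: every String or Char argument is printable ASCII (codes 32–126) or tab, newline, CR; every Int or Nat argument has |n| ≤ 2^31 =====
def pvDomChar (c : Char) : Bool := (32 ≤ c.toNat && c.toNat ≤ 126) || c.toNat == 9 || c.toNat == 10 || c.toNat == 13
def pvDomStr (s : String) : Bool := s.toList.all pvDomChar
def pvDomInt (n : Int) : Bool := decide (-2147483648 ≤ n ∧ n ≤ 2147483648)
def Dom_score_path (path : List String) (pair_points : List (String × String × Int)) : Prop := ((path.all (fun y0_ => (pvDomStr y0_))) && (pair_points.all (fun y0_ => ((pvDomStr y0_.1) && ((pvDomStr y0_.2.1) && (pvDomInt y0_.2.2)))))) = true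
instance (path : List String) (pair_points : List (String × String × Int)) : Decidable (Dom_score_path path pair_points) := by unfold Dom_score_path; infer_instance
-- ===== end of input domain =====

-- B builds a counter of the directed adjacent edges in one pass and then iterates over the
-- pair_points table, adding v * (edge occurrences in either direction) per entry, instead of
-- A's per-node loop doing modular prev/next lookups into pair_points (objective: alternative).

-- ===== PORT A =====
-- pair_points.get((a, b), 0) — first matching key, default 0
def pvGet (pp : List (String × String × Int)) (a b : String) : Int :=
  (((pp.find? (fun e => e.1 == a && e.2.1 == b)).map (fun e => e.2.2))).getD 0

def score_path (path : List String) (pair_points : List (String × String × Int)) : Int :=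
  let n : Int := path.length
  (PySem.List.pyRange 0 n 1).foldl (fun total i =>
    let j := PySem.Int.mod (i + 1) n
    let k := PySem.Int.mod (i + n - 1) n
    let p0 := PySem.List.pyGetD path i ""
    let p1 := PySem.List.pyGetD path j ""
    let p2 := PySem.List.pyGetD path k ""
    total + pvGet pair_points p0 p1 + pvGet pair_points p0 p2) 0

-- ===== PORT B =====
def score_path_alt (path : List String) (pair_points : List (String × String × Int)) : Int :=
  let edge_count : PySem.Dict (String × String) Int :=
    (path.zip (PySem.List.slice path (some 1) none ++ PySem.List.slice path none (some 1))).foldl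
      (fun d e => d.insert e (d.getD e 0 + 1)) PySem.Dict.empty
  pair_points.foldl (fun total kv =>
    total + kv.2.2 * (edge_count.getD (kv.1, kv.2.1) 0 + edge_count.getD (kv.2.1, kv.1) 0)) 0

-- ===== PRECONDITION & SPEC =====
-- Pre_ excludes association lists with duplicate keys, which represent no Python dict
-- (A's .get takes the first match while B iterates every item); no Python input is excluded.
def Pre_score_path (path : List String) (pair_points : List (String × String × Int)) : Prop :=
  (pair_points.map (fun kv => (kv.1, kv.2.1))).Nodup
instance (path : List String) (pair_points : List (String × String × Int)) : Decidable (Pre_score_path path pair_points) := by unfold Pre_score_path; infer_instance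

def pvWitness_score_path : List String × (List (String × String × Int)) :=
  (["a", "b", "c"], [("a", "b", 54), ("b", "a", 83), ("b", "c", -7)])

def Spec_score_path (path : List String) (pair_points : List (String × String × Int)) (out : Int) : Prop := out = score_path_alt path pair_points
instance (path : List String) (pair_points : List (String × String × Int)) (out : Int) : Decidable (Spec_score_path path pair_points out) := by unfold Spec_score_path; infer_instance

-- ===== CLAIM (what is proved, stated in full; the proofs are below) =====
def Claim_equal_score_path : Prop := ∀ (path : List String) (pair_points : List (String × String × Int)), Dom_score_path path pair_points → Pre_score_path path pair_points → Spec_score_path path pair_points (score_path path pair_points)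

-- ===== LEMMAS AND PROOFS =====

-- a fold 'total += g x' is a sum
theorem pv_foldl_add1 {α : Type} (l : List α) (g : α → Int) (init : Int) :
    l.foldl (fun t x => t + g x) init = init + (l.map g).sum := by
  induction l generalizing init with
  | nil => simp
  | cons a t ih => simp [List.foldl_cons, ih]; ring

-- a fold 'total += f x; total += h x' is a sum
theorem pv_foldl_add2 {α : Type} (l : List α) (f h : α → Int) (init : Int) :
    l.foldl (fun t x => t + f x + h x) init = init + (l.map (fun x => f x + h x)).sum := by
  induction l generalizing init with
  | nil => simp
  | cons a t ih => simp [List.foldl_cons, ih]; ring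

-- the rotated second column of B's zip, element by element
theorem pv_rot_getElem (path : List String) (k : Nat) (hk : k < path.length)
    (hkl : k < (path.drop 1 ++ path.take 1).length) :
    (path.drop 1 ++ path.take 1)[k] = path[(k + 1) % path.length]'(Nat.mod_lt _ (by omega)) := by
  rcases Nat.lt_or_ge k (path.length - 1) with h | h
  · have hmod : (k + 1) % path.length = 1 + k := by
      rw [Nat.mod_eq_of_lt (by omega)]; omega
    simp only [hmod]
    rw [List.getElem_append_left (by simp; omega)]
    exact List.getElem_drop
  · have hmod : (k + 1) % path.length = 0 := by
      have : k + 1 = path.length := by omega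
      rw [this, Nat.mod_self]
    simp only [hmod]
    rw [List.getElem_append_right (by simp; omega)]
    simp only [List.length_drop]
    have hi : k - (path.length - 1) = 0 := by omega
    simp only [hi]
    exact List.getElem_take

-- the circular edge list as an indexed list over range
theorem pv_zip_eq (path : List String) :
    path.zip (path.drop 1 ++ path.take 1) =
      (List.range path.length).map (fun k =>
        (path.getD k "", path.getD ((k + 1) % path.length) "")) := by
  rcases path with _ | ⟨a, t⟩
  · simp
  · set l := a :: t with hl
    have hn : 0 < l.length := by simp [hl]
    have hlen : (l.drop 1 ++ l.take 1).length = l.length := by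
      simp only [List.length_append, List.length_drop, List.length_take]; omega
    apply List.ext_getElem
    · simp only [List.length_zip, List.length_map, List.length_range, hlen, Nat.min_self]
    · intro k h1 h2
      have hk : k < l.length := by simpa using h2
      have hk2 : k < (l.drop 1 ++ l.take 1).length := by omega
      rw [List.getElem_zip, List.getElem_map, List.getElem_range]
      rw [pv_rot_getElem l k hk hk2]
      have hm : (k + 1) % l.length < l.length := Nat.mod_lt _ (by omega)
      rw [List.getD_eq_getElem l "" hk, List.getD_eq_getElem l "" hm]

-- the backward index map is a rotation of range
theorem pv_sigma_range (m : Nat) :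
    (List.range (m + 1)).map (fun k => (k + (m + 1) - 1) % (m + 1)) = m :: List.range m := by
  rw [List.range_succ_eq_map, List.map_cons, List.map_map]
  congr 1
  · simp
  · rw [List.map_congr_left (g := id), List.map_id]
    intro k hk
    have hk' : k < m := List.mem_range.mp hk
    simp only [Function.comp_apply, id_eq, Nat.succ_eq_add_one]
    have h1 : k + 1 + (m + 1) - 1 = k + (m + 1) := by omega
    rw [h1, Nat.add_mod_right, Nat.mod_eq_of_lt (by omega)]

-- reindexing: summing t over the backward-rotated indices is summing t over range
theorem pv_prev_eq_next (n : Nat) (t : Nat → Int) (hn : 0 < n) :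
    ((List.range n).map (fun k => t ((k + n - 1) % n))).sum = ((List.range n).map t).sum := by
  obtain ⟨m, rfl⟩ : ∃ m, n = m + 1 := ⟨n - 1, by omega⟩
  have h1 : (List.range (m + 1)).map (fun k => t ((k + (m + 1) - 1) % (m + 1)))
      = ((List.range (m + 1)).map (fun k => (k + (m + 1) - 1) % (m + 1))).map t := by
    rw [List.map_map]; rfl
  rw [h1, pv_sigma_range, List.range_succ]
  simp [add_comm]

-- (σ k) + 1 wraps back to k on range n
theorem pv_sigma_succ (n k : Nat) (hk : k < n) : ((k + n - 1) % n + 1) % n = k := by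
  rcases Nat.eq_zero_or_pos k with rfl | hkpos
  · have h1 : (0 + n - 1) % n = 0 + n - 1 := Nat.mod_eq_of_lt (by omega)
    rw [h1]
    have h2 : 0 + n - 1 + 1 = n := by omega
    rw [h2, Nat.mod_self]
  · have h1 : k + n - 1 = (k - 1) + n := by omega
    have h2 : (k - 1 + n) % n = k - 1 := by
      rw [Nat.add_mod_right]; exact Nat.mod_eq_of_lt (by omega)
    rw [h1, h2]
    have h3 : k - 1 + 1 = k := by omega
    rw [h3]
    exact Nat.mod_eq_of_lt hk

-- A equals the sum, over the circular edge list, of both directed lookups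
theorem pv_A_edges (path : List String) (pp : List (String × String × Int)) :
    score_path path pp =
      ((path.zip (path.drop 1 ++ path.take 1)).map
        (fun e => pvGet pp e.1 e.2 + pvGet pp e.2 e.1)).sum := by
  rcases Nat.eq_zero_or_pos path.length with hn0 | hn
  · rw [List.length_eq_zero_iff.mp hn0]; rfl
  have hA : score_path path pp =
      ((List.range path.length).map (fun k =>
        pvGet pp (path.getD k "") (path.getD ((k + 1) % path.length) "") +
        pvGet pp (path.getD k "") (path.getD ((k + path.length - 1) % path.length) ""))).sum := by
    have e : score_path path pp =
        (PySem.List.pyRange 0 (path.length : Int) 1).foldl (fun total i =>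
          total +
            pvGet pp (PySem.List.pyGetD path i "")
              (PySem.List.pyGetD path (PySem.Int.mod (i + 1) (path.length : Int)) "") +
            pvGet pp (PySem.List.pyGetD path i "")
              (PySem.List.pyGetD path (PySem.Int.mod (i + (path.length : Int) - 1) (path.length : Int)) "")) 0 := rfl
    rw [e, pv_foldl_add2, zero_add, PySem.List.pyRange_one]
    have h0 : ((path.length : Int) - 0).toNat = path.length := by omega
    rw [h0, List.map_map]
    congr 1
    apply List.map_congr_left
    intro k hk
    have hk' : k < path.length := List.mem_range.mp hk
    simp only [Function.comp_apply, zero_add]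
    have c1 : ((k : Int) + 1) = ((k + 1 : Nat) : Int) := by push_cast; ring
    have c2 : ((k : Int) + (path.length : Int) - 1) = ((k + path.length - 1 : Nat) : Int) := by
      push_cast [Nat.cast_sub (by omega : 1 ≤ k + path.length)]; ring
    rw [c1, c2, PySem.Int.mod_natCast, PySem.Int.mod_natCast,
      PySem.List.pyGetD_natCast, PySem.List.pyGetD_natCast, PySem.List.pyGetD_natCast]
  rw [hA, pv_zip_eq, List.map_map]
  have hback : ((List.range path.length).map
      ((fun e => pvGet pp e.1 e.2 + pvGet pp e.2 e.1) ∘ (fun k =>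
        (path.getD k "", path.getD ((k + 1) % path.length) "")))).sum =
      ((List.range path.length).map (fun k =>
        pvGet pp (path.getD k "") (path.getD ((k + 1) % path.length) "") +
        pvGet pp (path.getD ((k + 1) % path.length) "") (path.getD k ""))).sum := rfl
  rw [hback, PySem.List.sum_map_add_int, PySem.List.sum_map_add_int]
  congr 1
  have hcong : (List.range path.length).map (fun k =>
        pvGet pp (path.getD k "") (path.getD ((k + path.length - 1) % path.length) "")) =
      (List.range path.length).map (fun k =>
        (fun m => pvGet pp (path.getD ((m + 1) % path.length) "") (path.getD m ""))
          ((k + path.length - 1) % path.length)) := by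
    apply List.map_congr_left
    intro k hk
    have hk' : k < path.length := List.mem_range.mp hk
    simp only [pv_sigma_succ path.length k hk']
  rw [hcong]
  exact pv_prev_eq_next path.length
    (fun m => pvGet pp (path.getD ((m + 1) % path.length) "") (path.getD m "")) hn

-- B equals the sum, over the table, of v times the occurrence counts of both directions
theorem pv_B_sum (path : List String) (pp : List (String × String × Int)) :
    score_path_alt path pp =
      (pp.map (fun kv => kv.2.2 *
        (((path.zip (path.drop 1 ++ path.take 1)).count (kv.1, kv.2.1) : Int) +
         ((path.zip (path.drop 1 ++ path.take 1)).count (kv.2.1, kv.1) : Int)))).sum := by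
  unfold score_path_alt
  rw [PySem.List.slice_from_one, PySem.List.slice_to path (by norm_num), ← List.drop_one]
  have h1 : ((1 : Int)).toNat = 1 := rfl
  rw [h1, PySem.Dict.foldl_insert_getD_add_one_eq_counter, pv_foldl_add1, zero_add]
  congr 1
  apply List.map_congr_left
  intro kv _
  rw [PySem.Dict.getD_counter, PySem.Dict.getD_counter]

-- under key-nodup, the first-match lookup is the sum of matching entries
theorem pv_lookup_sum (pp : List (String × String × Int))
    (hnd : (pp.map (fun kv => (kv.1, kv.2.1))).Nodup) (q : String × String) :
    (pp.map (fun kv => if q = (kv.1, kv.2.1) then kv.2.2 else 0)).sum = pvGet pp q.1 q.2 := by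
  induction pp with
  | nil => simp [pvGet]
  | cons h t ih =>
    rw [List.map_cons, List.nodup_cons] at hnd
    obtain ⟨hnotin, hndt⟩ := hnd
    by_cases hq : q = (h.1, h.2.1)
    · have hb : (h.1 == q.1 && h.2.1 == q.2) = true := by
        rw [Bool.and_eq_true, beq_iff_eq, beq_iff_eq]
        exact ⟨(congrArg Prod.fst hq).symm, (congrArg Prod.snd hq).symm⟩
      have htz : (t.map (fun kv => if q = (kv.1, kv.2.1) then kv.2.2 else 0)).sum = 0 := by
        apply List.sum_eq_zero
        intro x hx
        obtain ⟨kv, hkv, rfl⟩ := List.mem_map.mp hx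
        have hne : q ≠ (kv.1, kv.2.1) := by
          intro he
          apply hnotin
          rw [hq] at he
          rw [he]
          exact List.mem_map.mpr ⟨kv, hkv, rfl⟩
        simp [hne]
      simp only [List.map_cons, List.sum_cons, if_pos hq, htz, add_zero]
      simp [pvGet, hb]
    · have hb : (h.1 == q.1 && h.2.1 == q.2) = false := by
        rw [Bool.and_eq_false_iff]
        by_cases h1 : h.1 = q.1
        · right
          rw [beq_eq_false_iff_ne]
          intro h2
          exact hq (Prod.ext h1.symm h2.symm)
        · left
          rw [beq_eq_false_iff_ne]
          exact h1
      simp only [List.map_cons, List.sum_cons, if_neg hq, zero_add]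
      rw [ih hndt]
      simp [pvGet, hb]

-- the bridge: summing lookups over the edges equals summing weighted counts over the table
theorem pv_bridge (E : List (String × String)) (pp : List (String × String × Int))
    (hnd : (pp.map (fun kv => (kv.1, kv.2.1))).Nodup) :
    (E.map (fun e => pvGet pp e.1 e.2 + pvGet pp e.2 e.1)).sum =
      (pp.map (fun kv => kv.2.2 *
        ((E.count (kv.1, kv.2.1) : Int) + (E.count (kv.2.1, kv.1) : Int)))).sum := by
  induction E with
  | nil => simp
  | cons e E ih =>
    rw [List.map_cons, List.sum_cons, ih]
    have hswap : ∀ kv : String × String × Int,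
        (e = (kv.2.1, kv.1)) ↔ ((e.2, e.1) = (kv.1, kv.2.1)) := by
      intro kv
      constructor
      · intro h; rw [h]
      · intro h
        exact Prod.ext (congrArg Prod.snd h) (congrArg Prod.fst h)
    have hsplit : (pp.map (fun kv => kv.2.2 *
        (((e :: E).count (kv.1, kv.2.1) : Int) + ((e :: E).count (kv.2.1, kv.1) : Int)))).sum =
        (pp.map (fun kv => (if e = (kv.1, kv.2.1) then kv.2.2 else 0) +
          ((if e = (kv.2.1, kv.1) then kv.2.2 else 0) +
           kv.2.2 * ((E.count (kv.1, kv.2.1) : Int) + (E.count (kv.2.1, kv.1) : Int))))).sum := by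
      congr 1
      apply List.map_congr_left
      intro kv _
      rw [List.count_cons, List.count_cons]
      simp only [beq_iff_eq]
      push_cast
      split_ifs <;> ring
    rw [hsplit, PySem.List.sum_map_add_int, PySem.List.sum_map_add_int]
    have hl1 : (pp.map (fun kv => if e = (kv.1, kv.2.1) then kv.2.2 else 0)).sum =
        pvGet pp e.1 e.2 := pv_lookup_sum pp hnd e
    have hl2 : (pp.map (fun kv => if e = (kv.2.1, kv.1) then kv.2.2 else 0)).sum =
        pvGet pp e.2 e.1 := by
      have hmap : (pp.map (fun kv => if e = (kv.2.1, kv.1) then kv.2.2 else 0)) =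
          (pp.map (fun kv => if (e.2, e.1) = (kv.1, kv.2.1) then kv.2.2 else 0)) := by
        apply List.map_congr_left
        intro kv _
        rw [if_congr (hswap kv) rfl rfl]
      rw [hmap, pv_lookup_sum pp hnd (e.2, e.1)]
    rw [hl1, hl2]
    ring

-- ===== VERDICT (by name: the statement is the Claim_ definition above) =====
theorem score_path_spec : Claim_equal_score_path := by
  intro path pp _ hpre
  unfold Spec_score_path
  rw [pv_A_edges, pv_B_sum, pv_bridge _ _ hpre]
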